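-- pv_equiv track=rewrite | github.com/ThomasC998/CAIT | QTester.py | makeCodesWestWall
-- ===== SOURCE A (Python) =====
-- def makeCodesWestWall(maxR, maxC, maxP, maxD):
--     codeSet = set()
--     for r in range(maxR + 1):
--         for c in range(maxC + 1):
--             for p in range(maxP + 1):
--                 for d in range(maxD + 1):
--                     if (r, c) in {(0, 0), (1, 0), (2, 0), (3, 0), (4, 0), (3, 1), (4, 1), (0, 2), (1, 2), (3, 3), (4, 3)}:
--                         codeSet.add(((((r * 5) + c) * 5 + p) * 4) + d)
--     return codeSet
-- ===== SOURCE B (Python) =====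
-- _WALL = ((0, 0), (0, 2), (1, 0), (1, 2), (2, 0), (3, 0), (3, 1), (3, 3), (4, 0), (4, 1), (4, 3))
--
-- def makeCodesWestWall(maxR, maxC, maxP, maxD):
--     # Bulk-range algorithm: per in-range wall position, the codes form contiguous
--     # integer intervals, so emit whole range() blocks instead of (p,d) pairs.
--     out = set()
--     if maxP < 0 or maxD < 0:
--         return out
--     span = 4 * maxP + maxD + 1
--     for r, c in _WALL:
--         if r <= maxR and c <= maxC:
--             b = (r * 5 + c) * 20
--             if maxD >= 3:
--                 # offsets p*4+d merge into one contiguous interval when maxD >= 3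
--                 out.update(range(b, b + span))
--             else:
--                 for p in range(maxP + 1):
--                     out.update(range(b + 4 * p, b + 4 * p + maxD + 1))
--     return out
-- ===== Notes on version B (the rewrite author's own statement) =====
-- stated objective: faster
-- what changed: A filters every cell of the full (maxR+1)x(maxC+1)x(maxP+1)x(maxD+1) grid against the 11-position set and adds codes one (r,c,p,d) tuple at a time; B iterates only the 11 wall positions and bulk-inserts whole contiguous range() blocks of codes, using that the offset set {p*4+d} is one contiguous interval when maxD>=3.
import Mathlib
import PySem

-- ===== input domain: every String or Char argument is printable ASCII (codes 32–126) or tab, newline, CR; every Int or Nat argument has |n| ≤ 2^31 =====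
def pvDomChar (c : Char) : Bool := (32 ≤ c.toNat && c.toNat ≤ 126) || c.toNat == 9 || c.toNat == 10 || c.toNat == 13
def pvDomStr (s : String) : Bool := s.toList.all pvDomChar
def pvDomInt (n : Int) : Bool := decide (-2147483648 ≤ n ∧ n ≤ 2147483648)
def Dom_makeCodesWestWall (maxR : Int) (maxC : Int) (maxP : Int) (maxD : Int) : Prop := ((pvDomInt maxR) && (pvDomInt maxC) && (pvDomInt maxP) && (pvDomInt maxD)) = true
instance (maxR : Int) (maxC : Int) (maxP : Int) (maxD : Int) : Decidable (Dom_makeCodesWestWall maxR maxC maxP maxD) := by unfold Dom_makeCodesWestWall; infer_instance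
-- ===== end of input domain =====

-- B replaces A's filtered scan of the whole (r,c,p,d) grid by a bulk-range build: per wall
-- position it inserts whole contiguous integer ranges of codes (objective: faster, measured).

-- ===== PORT A =====
-- the Python set literal of the 11 wall positions (used only for the membership test)
def pvWallSet : List (Int × Int) :=
  [(0, 0), (1, 0), (2, 0), (3, 0), (4, 0), (3, 1), (4, 1), (0, 2), (1, 2), (3, 3), (4, 3)]

def makeCodesWestWall (maxR : Int) (maxC : Int) (maxP : Int) (maxD : Int) : List Int :=
  (PySem.List.pyRange 0 (maxR + 1) 1).foldl (fun s r =>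
    (PySem.List.pyRange 0 (maxC + 1) 1).foldl (fun s c =>
      (PySem.List.pyRange 0 (maxP + 1) 1).foldl (fun s p =>
        (PySem.List.pyRange 0 (maxD + 1) 1).foldl (fun s d =>
          if (r, c) ∈ pvWallSet then PySem.Set.add s ((((r * 5) + c) * 5 + p) * 4 + d) else s)
        s) s) s) PySem.Set.empty

-- ===== PORT B =====
-- B's _WALL tuple (row-major order)
def pvWall : List (Int × Int) :=
  [(0, 0), (0, 2), (1, 0), (1, 2), (2, 0), (3, 0), (3, 1), (3, 3), (4, 0), (4, 1), (4, 3)]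

def makeCodesWestWall_alt (maxR : Int) (maxC : Int) (maxP : Int) (maxD : Int) : List Int :=
  let out : PySem.Set Int := PySem.Set.empty
  if maxP < 0 || maxD < 0 then out
  else
    let span := 4 * maxP + maxD + 1
    pvWall.foldl (fun out rc =>
      if rc.1 ≤ maxR && rc.2 ≤ maxC then
        let b := (rc.1 * 5 + rc.2) * 20
        if 3 ≤ maxD then
          PySem.Set.update out (PySem.List.pyRange b (b + span) 1)
        else
          (PySem.List.pyRange 0 (maxP + 1) 1).foldl (fun out p =>
            PySem.Set.update out (PySem.List.pyRange (b + 4 * p) (b + 4 * p + maxD + 1) 1)) out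
      else out) out

-- ===== PRECONDITION & SPEC =====
def Spec_makeCodesWestWall (maxR : Int) (maxC : Int) (maxP : Int) (maxD : Int) (out : List Int) : Prop := out = makeCodesWestWall_alt maxR maxC maxP maxD
instance (maxR : Int) (maxC : Int) (maxP : Int) (maxD : Int) (out : List Int) : Decidable (Spec_makeCodesWestWall maxR maxC maxP maxD out) := by unfold Spec_makeCodesWestWall; infer_instance

-- ===== CLAIM (what is proved, stated in full; the proofs are below) =====
def Claim_equal_makeCodesWestWall : Prop := ∀ (maxR : Int) (maxC : Int) (maxP : Int) (maxD : Int), Dom_makeCodesWestWall maxR maxC maxP maxD → Spec_makeCodesWestWall maxR maxC maxP maxD (makeCodesWestWall maxR maxC maxP maxD)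

-- ===== LEMMAS AND PROOFS =====

-- A's inner (p,d) double loop for one base value b = (r*5+c)*20
def pvAddCodes (maxP maxD : Int) (b : Int) (s : List Int) : List Int :=
  (PySem.List.pyRange 0 (maxP + 1) 1).foldl (fun s p =>
    (PySem.List.pyRange 0 (maxD + 1) 1).foldl (fun s d =>
      PySem.Set.add s (b + (p * 4 + d))) s) s

theorem pvHoist (maxP maxD r c : Int) (s : List Int) :
    (PySem.List.pyRange 0 (maxP + 1) 1).foldl (fun s p =>
      (PySem.List.pyRange 0 (maxD + 1) 1).foldl (fun s d =>
        if (r, c) ∈ pvWallSet then PySem.Set.add s ((((r * 5) + c) * 5 + p) * 4 + d) else s)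
      s) s
    = if (r, c) ∈ pvWallSet then pvAddCodes maxP maxD ((r * 5 + c) * 20) s else s := by
  by_cases h : (r, c) ∈ pvWallSet
  · simp only [h, if_true, pvAddCodes]
    have harith : ∀ p d : Int, ((r * 5 + c) * 5 + p) * 4 + d = (r * 5 + c) * 20 + (p * 4 + d) := by
      intro p d; ring
    simp only [harith]
  · simp only [h, if_false, List.foldl_fixed]

theorem pvRangeSplit (n : Int) (k : Nat) :
    PySem.List.pyRange 0 (n + 1) 1 =
      ((List.range k).map Int.ofNat).filter (fun i => decide (i ≤ n))
        ++ PySem.List.pyRange (k : Int) (n + 1) 1 := by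
  induction k with
  | zero => simp
  | succ k ih =>
    rw [List.range_succ, List.map_append, List.filter_append, ih, List.append_assoc]
    congr 1
    by_cases hk : (k : Int) ≤ n
    · rw [PySem.List.pyRange_one_cons (by omega)]
      simp [hk]
    · rw [PySem.List.pyRange_one_eq_nil (by omega), PySem.List.pyRange_one_eq_nil (by push_cast; omega)]
      simp [hk]

-- the tail of the column scan (c ≥ 4) never hits a wall position
theorem pvTailC (maxC maxP maxD r : Int) (X : List Int) :
    (PySem.List.pyRange 4 (maxC + 1) 1).foldl (fun s c =>
      if (r, c) ∈ pvWallSet then pvAddCodes maxP maxD ((r * 5 + c) * 20) s else s) X = X := by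
  rw [PySem.List.foldl_congr_mem (g := fun s _ => s), List.foldl_fixed]
  intro acc c hc
  have h4 : (4 : Int) ≤ c := (PySem.List.mem_pyRange_one.mp hc).1
  have hnm : (r, c) ∉ pvWallSet := by
    intro hm
    simp only [pvWallSet, List.mem_cons, List.not_mem_nil, Prod.mk.injEq, or_false] at hm
    omega
  exact if_neg hnm

-- the tail of the row scan (r ≥ 5) never hits a wall position
theorem pvTailR (maxR maxC maxP maxD : Int) (X : List Int) :
    (PySem.List.pyRange 5 (maxR + 1) 1).foldl (fun s r =>
      (PySem.List.pyRange 0 (maxC + 1) 1).foldl (fun s c =>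
        if (r, c) ∈ pvWallSet then pvAddCodes maxP maxD ((r * 5 + c) * 20) s else s) s) X = X := by
  rw [PySem.List.foldl_congr_mem (g := fun s _ => s), List.foldl_fixed]
  intro acc r hr
  have h5 : (5 : Int) ≤ r := (PySem.List.mem_pyRange_one.mp hr).1
  rw [PySem.List.foldl_congr_mem (g := fun s _ => s), List.foldl_fixed]
  intro acc' c _
  have hnm : (r, c) ∉ pvWallSet := by
    intro hm
    simp only [pvWallSet, List.mem_cons, List.not_mem_nil, Prod.mk.injEq, or_false] at hm
    omega
  exact if_neg hnm

-- Set.update is a left fold of add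
theorem pvUpdateEq (s l : List Int) : PySem.Set.update s l = l.foldl PySem.Set.add s := rfl

-- updating with elements already present is the identity
theorem pvUpdateAbsorb (s l : List Int) (h : ∀ x ∈ l, x ∈ s) : PySem.Set.update s l = s := by
  induction l generalizing s with
  | nil => rfl
  | cons a l ih =>
    have ha : a ∈ s := h a (List.mem_cons_self ..)
    show PySem.Set.update (PySem.Set.add s a) l = s
    rw [PySem.Set.add_of_mem ha]
    exact ih s (fun x hx => h x (List.mem_cons_of_mem _ hx))

-- A's inner d-loop for a fixed p is one bulk range update
theorem pvInnerRange (maxD b p : Int) (s : List Int) :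
    (PySem.List.pyRange 0 (maxD + 1) 1).foldl (fun s d => PySem.Set.add s (b + (p * 4 + d))) s
      = PySem.Set.update s (PySem.List.pyRange (b + 4 * p) (b + 4 * p + maxD + 1) 1) := by
  rw [PySem.List.pyRange_one 0 (maxD + 1), PySem.List.pyRange_one (b + 4 * p) (b + 4 * p + maxD + 1)]
  have ht : (b + 4 * p + maxD + 1 - (b + 4 * p)).toNat = (maxD + 1 - 0).toNat := by omega
  rw [ht, pvUpdateEq, List.foldl_map, List.foldl_map]
  have hf : (fun (acc : List Int) (k : Nat) => PySem.Set.add acc (b + (p * 4 + (0 + (k : Int)))))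
      = fun (acc : List Int) (k : Nat) => PySem.Set.add acc (b + 4 * p + (k : Int)) := by
    funext acc k
    congr 1
    ring
  rw [hf]

-- for maxD ≥ 3 the per-base (p,d) double loop collapses to one contiguous range update
theorem pvBlocksNat (maxD b : Int) (hD3 : 3 ≤ maxD) (n : Nat) (s : List Int) :
    (PySem.List.pyRange 0 ((n : Int) + 1) 1).foldl (fun s p =>
      PySem.Set.update s (PySem.List.pyRange (b + 4 * p) (b + 4 * p + maxD + 1) 1)) s
    = PySem.Set.update s (PySem.List.pyRange b (b + 4 * (n : Int) + maxD + 1) 1) := by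
  induction n generalizing s with
  | zero =>
    rw [PySem.List.pyRange_one_cons (by omega), PySem.List.pyRange_one_eq_nil (by omega)]
    simp only [List.foldl_cons, List.foldl_nil]
    norm_num
  | succ n ih =>
    have hsucc : ((n + 1 : Nat) : Int) + 1 = ((n : Int) + 1) + 1 := by push_cast; ring
    rw [hsucc, PySem.List.pyRange_one_succ_right (by omega), List.foldl_append]
    simp only [List.foldl_cons, List.foldl_nil]
    rw [ih]
    set m := b + 4 * (n : Int) + maxD + 1 with hm
    have hcast : b + 4 * ((n : Int) + 1) = b + 4 * (n : Int) + 4 := by ring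
    rw [hcast]
    have hsplit : PySem.List.pyRange (b + 4 * (n : Int) + 4) (b + 4 * (n : Int) + 4 + maxD + 1) 1
        = PySem.List.pyRange (b + 4 * (n : Int) + 4) m 1
          ++ PySem.List.pyRange m (b + 4 * (n : Int) + 4 + maxD + 1) 1 :=
      PySem.List.pyRange_one_append _ _ _ (by omega) (by omega)
    rw [hsplit, PySem.Set.update_append]
    rw [pvUpdateAbsorb (PySem.Set.update s (PySem.List.pyRange b m 1))
        (PySem.List.pyRange (b + 4 * (n : Int) + 4) m 1) ?happ]
    · rw [← PySem.Set.update_append, ← PySem.List.pyRange_one_append b m _ (by omega) (by omega)]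
      have hxy : b + 4 * ((n + 1 : Nat) : Int) + maxD + 1 = b + 4 * (n : Int) + 4 + maxD + 1 := by
        push_cast; ring
      rw [hxy]
    · intro x hx
      have hb := PySem.List.mem_pyRange_one.mp hx
      rw [PySem.Set.mem_update]
      exact Or.inr (PySem.List.mem_pyRange_one.mpr ⟨by omega, hb.2⟩)

-- for 0 ≤ maxP, A's per-base double loop equals B's per-base body
theorem pvPerBase (maxP maxD b : Int) (hP : 0 ≤ maxP) (s : List Int) :
    pvAddCodes maxP maxD b s =
      if 3 ≤ maxD then
        PySem.Set.update s (PySem.List.pyRange b (b + (4 * maxP + maxD + 1)) 1)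
      else
        (PySem.List.pyRange 0 (maxP + 1) 1).foldl (fun s p =>
          PySem.Set.update s (PySem.List.pyRange (b + 4 * p) (b + 4 * p + maxD + 1) 1)) s := by
  unfold pvAddCodes
  simp only [pvInnerRange]
  by_cases h3 : 3 ≤ maxD
  · rw [if_pos h3]
    obtain ⟨n, hn⟩ : ∃ n : Nat, maxP = (n : Int) := ⟨maxP.toNat, by omega⟩
    subst hn
    rw [pvBlocksNat maxD b h3 n s]
    have : b + 4 * (n : Int) + maxD + 1 = b + (4 * (n : Int) + maxD + 1) := by ring
    rw [this]
  · rw [if_neg h3]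

-- when maxP < 0 or maxD < 0, A's per-base double loop is the identity
theorem pvPerBaseNeg (maxP maxD b : Int) (h : maxP < 0 ∨ maxD < 0) (s : List Int) :
    pvAddCodes maxP maxD b s = s := by
  unfold pvAddCodes
  rcases h with h | h
  · rw [PySem.List.pyRange_one_eq_nil (a := 0) (b := maxP + 1) (by omega)]
    rfl
  · rw [PySem.List.pyRange_one_eq_nil (a := 0) (b := maxD + 1) (by omega)]
    simp only [List.foldl_nil, List.foldl_fixed]

-- ===== VERDICT (by name: the statement is the Claim_ definition above) =====
set_option maxHeartbeats 1000000 in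
theorem makeCodesWestWall_spec : Claim_equal_makeCodesWestWall := by
  intro maxR maxC maxP maxD _
  unfold Spec_makeCodesWestWall
  unfold makeCodesWestWall makeCodesWestWall_alt
  simp only [pvHoist]
  by_cases hneg : maxP < 0 ∨ maxD < 0
  · -- both sides are the empty set
    rw [if_pos (by rcases hneg with h | h <;> simp [h])]
    simp only [pvPerBaseNeg maxP maxD _ hneg, ite_self, List.foldl_fixed]
  · rw [not_or] at hneg
    obtain ⟨hP', hD'⟩ := hneg
    have hP : 0 ≤ maxP := by omega
    rw [if_neg (by simp; omega)]
    -- rewrite B's per-base body to A's pvAddCodes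
    have hbody : ∀ (acc : List Int), ∀ rc ∈ pvWall,
        (if rc.1 ≤ maxR && rc.2 ≤ maxC then
           if 3 ≤ maxD then
             PySem.Set.update acc (PySem.List.pyRange ((rc.1 * 5 + rc.2) * 20)
               ((rc.1 * 5 + rc.2) * 20 + (4 * maxP + maxD + 1)) 1)
           else
             (PySem.List.pyRange 0 (maxP + 1) 1).foldl (fun out p =>
               PySem.Set.update out (PySem.List.pyRange ((rc.1 * 5 + rc.2) * 20 + 4 * p)
                 ((rc.1 * 5 + rc.2) * 20 + 4 * p + maxD + 1) 1)) acc
         else acc)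
        = (if rc.1 ≤ maxR && rc.2 ≤ maxC then
             pvAddCodes maxP maxD ((rc.1 * 5 + rc.2) * 20) acc else acc) := by
      intro acc rc _
      by_cases hc : (rc.1 ≤ maxR && rc.2 ≤ maxC) = true
      · rw [if_pos hc, if_pos hc, pvPerBase maxP maxD _ hP acc]
      · rw [if_neg hc, if_neg hc]
    rw [PySem.List.foldl_congr_mem pvWall _ _ _ hbody]
    -- reduce A's row/column ranges to the finitely many wall rows/columns
    rw [pvRangeSplit maxR 5]
    push_cast
    rw [List.foldl_append, pvTailR]
    simp only [pvRangeSplit maxC 4]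
    push_cast
    simp only [List.foldl_append, pvTailC]
    rw [show (List.range 5).map Int.ofNat = ([0, 1, 2, 3, 4] : List Int) from rfl]
    simp only [show (List.range 4).map Int.ofNat = ([0, 1, 2, 3] : List Int) from rfl]
    obtain ⟨mR, hR1, hR2, hRiff⟩ : ∃ m : Int, -1 ≤ m ∧ m ≤ 4 ∧
        ∀ i : Int, 0 ≤ i → i ≤ 4 → (decide (i ≤ maxR) = decide (i ≤ m)) :=
      ⟨max (min maxR 4) (-1), by omega, by omega, by
        intro i h0 h4
        apply decide_eq_decide.mpr
        omega⟩
    obtain ⟨mC, hC1, hC2, hCiff⟩ : ∃ m : Int, -1 ≤ m ∧ m ≤ 3 ∧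
        ∀ i : Int, 0 ≤ i → i ≤ 3 → (decide (i ≤ maxC) = decide (i ≤ m)) :=
      ⟨max (min maxC 3) (-1), by omega, by omega, by
        intro i h0 h3
        apply decide_eq_decide.mpr
        omega⟩
    rw [show List.filter (fun i => decide (i ≤ maxR)) ([0, 1, 2, 3, 4] : List Int)
        = List.filter (fun i => decide (i ≤ mR)) ([0, 1, 2, 3, 4] : List Int) from
      List.filter_congr (fun i hi => by
        have h04 : (0 : Int) ≤ i ∧ i ≤ 4 := by simp at hi; omega
        exact hRiff i h04.1 h04.2)]
    simp only [show List.filter (fun i => decide (i ≤ maxC)) ([0, 1, 2, 3] : List Int)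
        = List.filter (fun i => decide (i ≤ mC)) ([0, 1, 2, 3] : List Int) from
      List.filter_congr (fun i hi => by
        have h04 : (0 : Int) ≤ i ∧ i ≤ 3 := by simp at hi; omega
        exact hCiff i h04.1 h04.2)]
    have hclamp : ∀ (acc : List Int), ∀ rc ∈ pvWall,
        (if rc.1 ≤ maxR && rc.2 ≤ maxC then
           pvAddCodes maxP maxD ((rc.1 * 5 + rc.2) * 20) acc else acc)
        = (if rc.1 ≤ mR && rc.2 ≤ mC then
             pvAddCodes maxP maxD ((rc.1 * 5 + rc.2) * 20) acc else acc) := by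
      intro acc rc hrc
      have hbounds : (0 : Int) ≤ rc.1 ∧ rc.1 ≤ 4 ∧ 0 ≤ rc.2 ∧ rc.2 ≤ 3 := by
        simp only [pvWall, List.mem_cons, List.not_mem_nil, or_false] at hrc
        rcases hrc with rfl | rfl | rfl | rfl | rfl | rfl | rfl | rfl | rfl | rfl | rfl <;> norm_num
      rw [show (decide (rc.1 ≤ maxR) && decide (rc.2 ≤ maxC))
            = (decide (rc.1 ≤ mR) && decide (rc.2 ≤ mC)) by
        rw [hRiff rc.1 hbounds.1 hbounds.2.1, hCiff rc.2 hbounds.2.2.1 hbounds.2.2.2]]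
    rw [PySem.List.foldl_congr_mem pvWall _ _ _ hclamp]
    interval_cases mR <;> interval_cases mC <;> rfl
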